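-- pv_equiv track=rewrite | github.com/jake126/groupbalance-app | src/main/python/org/sortition/groupselect/allocator/TAAllocator.py | evaluate_actions
-- ===== SOURCE A (Python) =====
-- def evaluate_actions(ideal_dist, table_dist, cat_labels, table_size):
--     # what can we sub out an agent with value X for to lead to a pareto improvement?
--     table_discrepancies = [y-x for y, x in zip(table_dist, ideal_dist)]
--     actions = {}
--     # what pareto improvement actions can be taken given the ideal split and the table split?
--     for index, label in enumerate(cat_labels):
--         actions_for_label = []
--         if table_dist[index] > ideal_dist[index]:
--             # there are too many of this label on the table - a reduction is always a pareto improvement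
--             # what can we increase to fund this?
--             for a, b in zip(table_discrepancies, cat_labels):
--                 if a < 0:
--                     actions_for_label.append(b)
--         actions[label] = actions_for_label
--     return actions
-- ===== SOURCE B (Python) =====
-- def evaluate_actions(ideal_dist, table_dist, cat_labels, table_size):
--     # compute the deficit-label list ONCE instead of once per surplus label
--     deficits = [lab for d, lab in zip((y - x for y, x in zip(table_dist, ideal_dist)), cat_labels) if d < 0]
--     return {lab: (deficits if table_dist[i] > ideal_dist[i] else [])
--             for i, lab in enumerate(cat_labels)}
-- ===== Notes on version B (the rewrite author's own statement) =====
-- stated objective: faster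
-- what changed: B computes the deficit-label list once up front (a single filtered zip) and reuses it for every surplus label via a dict comprehension, instead of A's inner scan over all labels repeated for each surplus label.
import Mathlib
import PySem

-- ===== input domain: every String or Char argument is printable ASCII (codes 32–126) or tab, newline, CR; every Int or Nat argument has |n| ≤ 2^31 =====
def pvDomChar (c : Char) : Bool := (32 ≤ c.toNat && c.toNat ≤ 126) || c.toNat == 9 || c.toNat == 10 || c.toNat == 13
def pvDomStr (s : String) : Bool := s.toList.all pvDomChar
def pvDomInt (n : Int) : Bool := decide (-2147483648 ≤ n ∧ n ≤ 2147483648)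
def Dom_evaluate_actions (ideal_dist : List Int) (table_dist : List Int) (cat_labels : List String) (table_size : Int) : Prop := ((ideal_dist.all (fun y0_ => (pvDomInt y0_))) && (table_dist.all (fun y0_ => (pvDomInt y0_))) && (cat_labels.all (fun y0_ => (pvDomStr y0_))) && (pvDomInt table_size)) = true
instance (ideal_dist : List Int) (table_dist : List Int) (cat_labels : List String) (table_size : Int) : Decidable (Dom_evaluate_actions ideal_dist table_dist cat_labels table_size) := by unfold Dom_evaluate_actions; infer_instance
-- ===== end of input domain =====

-- B hoists the deficit-label list out of the per-label loop (computed once, reused), objective: faster.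

-- ===== PORT A =====
def evaluate_actions (ideal_dist : List Int) (table_dist : List Int) (cat_labels : List String) (table_size : Int) : List (String × List String) :=
  let table_discrepancies := (table_dist.zip ideal_dist).map (fun p => p.1 - p.2)
  let actions : PySem.Dict String (List String) :=
    (PySem.List.enumerate cat_labels 0).foldl (fun acc il =>
      let actions_for_label : List String :=
        if PySem.List.pyGetD table_dist il.1 0 > PySem.List.pyGetD ideal_dist il.1 0 then
          (table_discrepancies.zip cat_labels).foldl
            (fun afl ab => if ab.1 < 0 then afl ++ [ab.2] else afl) []
        else []
      acc.insert il.2 actions_for_label) PySem.Dict.empty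
  actions.items

-- ===== PORT B =====
def evaluate_actions_alt (ideal_dist : List Int) (table_dist : List Int) (cat_labels : List String) (table_size : Int) : List (String × List String) :=
  let deficits : List String :=
    (((table_dist.zip ideal_dist).map (fun p => p.1 - p.2)).zip cat_labels).filterMap
      (fun ab => if ab.1 < 0 then some ab.2 else none)
  ((PySem.List.enumerate cat_labels 0).foldl (fun (acc : PySem.Dict String (List String)) il =>
      acc.insert il.2
        (if PySem.List.pyGetD table_dist il.1 0 > PySem.List.pyGetD ideal_dist il.1 0 then deficits else []))
    PySem.Dict.empty).items

-- ===== PRECONDITION & SPEC =====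
-- A indexes table_dist[index] and ideal_dist[index] for every index of cat_labels and raises
-- IndexError when either dist list is shorter than cat_labels; Pre_ excludes exactly those inputs.
def Pre_evaluate_actions (ideal_dist : List Int) (table_dist : List Int) (cat_labels : List String) (table_size : Int) : Prop :=
  cat_labels.length ≤ ideal_dist.length ∧ cat_labels.length ≤ table_dist.length
instance (ideal_dist : List Int) (table_dist : List Int) (cat_labels : List String) (table_size : Int) : Decidable (Pre_evaluate_actions ideal_dist table_dist cat_labels table_size) := by unfold Pre_evaluate_actions; infer_instance
def pvWitness_evaluate_actions : List Int × List Int × List String × Int := ([1, 3], [2, 1], ["a", "b"], 5)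

def Spec_evaluate_actions (ideal_dist : List Int) (table_dist : List Int) (cat_labels : List String) (table_size : Int) (out : List (String × List String)) : Prop := out = evaluate_actions_alt ideal_dist table_dist cat_labels table_size
instance (ideal_dist : List Int) (table_dist : List Int) (cat_labels : List String) (table_size : Int) (out : List (String × List String)) : Decidable (Spec_evaluate_actions ideal_dist table_dist cat_labels table_size out) := by unfold Spec_evaluate_actions; infer_instance

-- ===== CLAIM (what is proved, stated in full; the proofs are below) =====
def Claim_equal_evaluate_actions : Prop := ∀ (ideal_dist : List Int) (table_dist : List Int) (cat_labels : List String) (table_size : Int), Dom_evaluate_actions ideal_dist table_dist cat_labels table_size → Pre_evaluate_actions ideal_dist table_dist cat_labels table_size → Spec_evaluate_actions ideal_dist table_dist cat_labels table_size (evaluate_actions ideal_dist table_dist cat_labels table_size)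

-- ===== LEMMAS AND PROOFS =====
theorem foldl_append_eq_filterMap (l : List (Int × String)) (acc : List String) :
    l.foldl (fun afl ab => if ab.1 < 0 then afl ++ [ab.2] else afl) acc
      = acc ++ l.filterMap (fun ab => if ab.1 < 0 then some ab.2 else none) := by
  induction l generalizing acc with
  | nil => simp
  | cons h t ih => simp only [List.foldl_cons, List.filterMap_cons]; split_ifs <;> simp [ih]

-- ===== VERDICT (by name: the statement is the Claim_ definition above) =====
theorem evaluate_actions_spec : Claim_equal_evaluate_actions := by
  intro ideal_dist table_dist cat_labels table_size _ _
  unfold Spec_evaluate_actions evaluate_actions evaluate_actions_alt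
  simp only [foldl_append_eq_filterMap, List.nil_append]
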